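-- pv_equiv track=rewrite | github.com/genki09/crawler | operateFiles/do.py | get_NewRuleFilesName
-- ===== SOURCE A (Python) =====
-- def get_ColoredElement(element: str) -> str:
--     """
--     该函数决定新文件名里的所有元素以什么样的方式连接在一起
--     :param element: 新文件名里的单个元素
--     :return: ‘[元素]’
--     """
--     return '[' + element + ']'
--
-- def get_NewRuleFilesName(maxNum: int, newElementList: list) -> list:
--     """
--     该函数负责生成最终的文件名（不包含拓展名）列表，之所以要生成列表是由于存在拓展名不同但文件名必须相同的情况
--     :param maxNum: 要更改多少集的文件，取决于之前检查的结果
--     :param newElementList: 含有所有新名称元素的列表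
--     :return: ['新文件名1', '新文件名2', '新文件名3', ...]
--     """
--     newRuleList = []
--     for m in range(maxNum):
--         finalNewName = ''
--         num = str(m + 1)
--         if int(num) < 10:
--             num = '0' + num
--         for item in newElementList:
--             finalNewName += get_ColoredElement(item) if item else get_ColoredElement(num)
--         newRuleList.append(finalNewName)
--
--     return newRuleList
-- ===== SOURCE B (Python) =====
-- def get_NewRuleFilesName(maxNum: int, newElementList: list) -> list:
--     # Split the element list once at its empty items: each run of non-empty items
--     # becomes one pre-concatenated '[item]...' segment; the per-episode number token
--     # then joins the segments, so the inner per-episode loop disappears.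
--     done = []
--     cur = ''
--     for item in newElementList:
--         if item:
--             cur += '[' + item + ']'
--         else:
--             done.append(cur)
--             cur = ''
--     segments = done + [cur]
--     result = []
--     for m in range(maxNum):
--         num = str(m + 1)
--         if int(num) < 10:
--             num = '0' + num
--         result.append(('[' + num + ']').join(segments))
--     return result
-- ===== Notes on version B (the rewrite author's own statement) =====
-- stated objective: faster
-- what changed: B walks the element list once, splitting it at empty items into pre-concatenated '[item]' segments, then builds each filename with a single str.join of the segments on that episode's '[num]' token, eliminating A's inner per-episode loop and repeated '+=' concatenation over the elements.
import Mathlib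
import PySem

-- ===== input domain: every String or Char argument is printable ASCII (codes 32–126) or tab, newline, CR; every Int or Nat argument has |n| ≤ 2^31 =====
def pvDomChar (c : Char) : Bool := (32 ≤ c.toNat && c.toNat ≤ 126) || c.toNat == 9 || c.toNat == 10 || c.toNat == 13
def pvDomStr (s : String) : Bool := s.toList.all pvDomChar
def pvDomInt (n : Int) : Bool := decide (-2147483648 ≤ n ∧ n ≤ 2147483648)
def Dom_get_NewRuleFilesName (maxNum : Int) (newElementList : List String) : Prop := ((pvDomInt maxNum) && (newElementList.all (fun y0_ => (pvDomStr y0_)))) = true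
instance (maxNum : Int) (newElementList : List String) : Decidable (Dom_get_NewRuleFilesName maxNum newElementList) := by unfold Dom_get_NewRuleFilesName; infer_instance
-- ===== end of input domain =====

-- B replaces A's nested loop by a one-pass split of the element list into segments at its
-- empty items, joined per episode by the number token (objective: faster — measured by the
-- timing run; A revisits every element and re-concatenates for each episode).


-- ===== PORT A =====
-- '[' + element + ']'  (string '+' ported as char-list append, exact)
def get_ColoredElement (element : String) : String :=
  String.ofList ('[' :: element.toList ++ [']'])

-- num = str(m + 1); if int(num) < 10: num = '0' + num
-- (num is always a plain decimal numeral here, so int(num) never raises; getD's default is unreachable)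
def pvNumA (m : Int) : String :=
  let num := PySem.Int.toStr (m + 1)
  if (PySem.Int.ofStr? num).getD 0 < 10 then String.ofList ('0' :: num.toList) else num

-- body of A's inner 'for item in newElementList' loop ('if item' = item non-empty)
def pvInnerA (num finalNewName item : String) : String :=
  String.ofList (finalNewName.toList ++
    (if item ≠ "" then get_ColoredElement item else get_ColoredElement num).toList)

def get_NewRuleFilesName (maxNum : Int) (newElementList : List String) : List String :=
  (PySem.List.pyRange 0 maxNum 1).foldl (fun newRuleList m =>
    newRuleList ++ [newElementList.foldl (pvInnerA (pvNumA m)) ""]) []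

-- ===== PORT B =====
-- (B's episode-number lines are literally A's two lines, so B's port reuses pvNumA)
-- body of B's segment-building loop: state (done, cur)
def pvSegStep (st : List String × String) (item : String) : List String × String :=
  if item ≠ "" then (st.1, String.ofList (st.2.toList ++ '[' :: item.toList ++ [']']))
  else (st.1 ++ [st.2], "")

def get_NewRuleFilesName_alt (maxNum : Int) (newElementList : List String) : List String :=
  let st := newElementList.foldl pvSegStep ([], "")
  let segments := st.1 ++ [st.2]
  (PySem.List.pyRange 0 maxNum 1).foldl (fun result m =>
    result ++ [PySem.Str.join (String.ofList ('[' :: (pvNumA m).toList ++ [']'])) segments]) []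

-- ===== PRECONDITION & SPEC =====
def Spec_get_NewRuleFilesName (maxNum : Int) (newElementList : List String) (out : List String) : Prop := out = get_NewRuleFilesName_alt maxNum newElementList
instance (maxNum : Int) (newElementList : List String) (out : List String) : Decidable (Spec_get_NewRuleFilesName maxNum newElementList out) := by unfold Spec_get_NewRuleFilesName; infer_instance

-- ===== CLAIM (what is proved, stated in full; the proofs are below) =====
def Claim_equal_get_NewRuleFilesName : Prop := ∀ (maxNum : Int) (newElementList : List String), Dom_get_NewRuleFilesName maxNum newElementList → Spec_get_NewRuleFilesName maxNum newElementList (get_NewRuleFilesName maxNum newElementList)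

-- ===== LEMMAS AND PROOFS =====

-- proof-side characterisation of the segments, by recursion on the front of the list:
-- (first segment, remaining segments)
def pvSegsR : List String → List Char × List (List Char)
  | [] => ([], [])
  | i :: xs =>
    let ht := pvSegsR xs
    if i ≠ "" then ('[' :: i.toList ++ [']'] ++ ht.1, ht.2) else ([], ht.1 :: ht.2)

theorem pvJoin_append_head (sep a h : List Char) (t : List (List Char)) :
    PySem.Chars.join sep ((a ++ h) :: t) = a ++ PySem.Chars.join sep (h :: t) := by
  cases t with
  | nil => simp [PySem.Chars.join_singleton]
  | cons q r => simp [PySem.Chars.join_cons_cons]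

theorem pvInnerA_eq_join (xs : List String) (num : String) (acc : String) :
    (xs.foldl (pvInnerA num) acc).toList =
      acc.toList ++ PySem.Chars.join ('[' :: num.toList ++ [']'])
        ((pvSegsR xs).1 :: (pvSegsR xs).2) := by
  induction xs generalizing acc with
  | nil => simp [pvSegsR, PySem.Chars.join_singleton]
  | cons i xs ih =>
    by_cases hi : i = ""
    · subst hi
      rw [List.foldl_cons, ih]
      have hs : pvSegsR ("" :: xs) = ([], (pvSegsR xs).1 :: (pvSegsR xs).2) := by
        simp [pvSegsR]
      rw [hs]
      simp [pvInnerA, get_ColoredElement, PySem.Chars.join_cons_cons]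
    · rw [List.foldl_cons, ih]
      have hs : pvSegsR (i :: xs) = ('[' :: i.toList ++ [']'] ++ (pvSegsR xs).1, (pvSegsR xs).2) := by
        simp [pvSegsR, hi]
      rw [hs]
      rw [pvJoin_append_head]
      simp [pvInnerA, get_ColoredElement, hi]

theorem pvSegStep_eq_segsR (xs : List String) (done : List String) (cur : String) :
    ((xs.foldl pvSegStep (done, cur)).1 ++ [(xs.foldl pvSegStep (done, cur)).2]).map String.toList
      = done.map String.toList ++ (cur.toList ++ (pvSegsR xs).1) :: (pvSegsR xs).2 := by
  induction xs generalizing done cur with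
  | nil => simp [pvSegsR]
  | cons i xs ih =>
    by_cases hi : i = ""
    · simp only [List.foldl_cons, pvSegStep, hi, ite_false, ne_eq, not_true_eq_false]
      rw [ih]
      simp [pvSegsR]
    · simp only [List.foldl_cons, pvSegStep, if_pos (by simpa using hi)]
      rw [ih]
      simp [pvSegsR, hi]

-- ===== VERDICT (by name: the statement is the Claim_ definition above) =====
theorem get_NewRuleFilesName_spec : Claim_equal_get_NewRuleFilesName := by
  intro maxNum newElementList _
  show get_NewRuleFilesName maxNum newElementList = get_NewRuleFilesName_alt maxNum newElementList
  unfold get_NewRuleFilesName get_NewRuleFilesName_alt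
  rw [PySem.List.foldl_append_singleton_eq_map, PySem.List.foldl_append_singleton_eq_map]
  simp only [List.nil_append]
  apply List.map_congr_left
  intro m _
  apply String.toList_inj.mp
  rw [pvInnerA_eq_join, PySem.Str.toList_join]
  have hseg := pvSegStep_eq_segsR newElementList [] ""
  simp only [List.map_nil, List.nil_append, String.toList_empty] at hseg ⊢
  rw [hseg]
  simp [pvNumA]
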